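-- pv_equiv track=rewrite | github.com/lxconfig/UbuntuCode_bak | algorithm/leetcode/dp/24-石子游戏.py | stoneGame_1
-- ===== SOURCE A (Python) =====
-- from typing import List
--
-- def stoneGame_1(piles: List[int]) -> bool:
--     """也可以对列从左往右遍历，对行从下往上遍历，来填dp表
--     """
--     size = len(piles)
--     # [0, 0]分别表示先手和后手能获得的最多石子数
--     dp = [[[0, 0] for _ in range(size)] for _ in range(size)]
--     # base case
--     for i in range(size):
--         dp[i][i][0] = piles[i]
--         # dp[i][i][1] = 0
--
--     for j in range(1, size):
--         for i in range(j-1, -1, -1):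
--             # 0表示先手，1表示后手
--             left = piles[i] + dp[i+1][j][1]
--             right = piles[j] + dp[i][j-1][1]
--             if left > right:
--                 dp[i][j][0] = left
--                 dp[i][j][1] = dp[i+1][j][0]
--             else:
--                 dp[i][j][0] = right
--                 dp[i][j][1] = dp[i][j-1][0]
--     return bool(dp[0][size-1][0] - dp[0][size-1][1])
-- ===== SOURCE B (Python) =====
-- from typing import List
--
-- def stoneGame_1(piles: List[int]) -> bool:
--     memo = {}
--
--     def f(i: int, j: int) -> int:
--         # best achievable (own - opponent) score difference on piles[i..j]
--         if i == j:
--             return piles[i]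
--         if (i, j) not in memo:
--             memo[(i, j)] = max(piles[i] - f(i + 1, j), piles[j] - f(i, j - 1))
--         return memo[(i, j)]
--
--     return bool(f(0, len(piles) - 1))
-- ===== Notes on version B (the rewrite author's own statement) =====
-- stated objective: simpler
-- what changed: Replaced the bottom-up (first,second)-pair interval DP table with a memoized top-down recursion that tracks only the score difference per interval.
import Mathlib
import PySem

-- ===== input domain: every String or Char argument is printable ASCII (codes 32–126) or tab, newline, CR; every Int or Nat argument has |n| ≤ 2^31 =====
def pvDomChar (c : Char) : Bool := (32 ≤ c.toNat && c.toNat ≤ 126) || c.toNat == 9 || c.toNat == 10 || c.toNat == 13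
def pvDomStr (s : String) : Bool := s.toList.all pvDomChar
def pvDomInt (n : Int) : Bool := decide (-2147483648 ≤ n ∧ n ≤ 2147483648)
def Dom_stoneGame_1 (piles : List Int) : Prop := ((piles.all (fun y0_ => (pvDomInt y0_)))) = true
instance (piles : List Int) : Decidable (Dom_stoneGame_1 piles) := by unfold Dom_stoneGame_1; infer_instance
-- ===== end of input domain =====

-- B replaces A's bottom-up (first,second)-pair interval DP table by a memoized top-down
-- recursion on the score difference only (objective: simpler).


-- ===== PORT A =====
-- the mutable list-of-lists dp (dp[i][j] = [first, second]) is kept as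
-- List (List (Int × Int)); pvGet/pvSet are dp[i][j] read/write (exact for the
-- in-range indices A uses)
def pvGet (dp : List (List (Int × Int))) (i j : Nat) : Int × Int :=
  (dp.getD i []).getD j (0, 0)

def pvSet (dp : List (List (Int × Int))) (i j : Nat) (v : Int × Int) :
    List (List (Int × Int)) :=
  dp.set i ((dp.getD i []).set j v)

-- the body of A's inner loop (one iteration for a given j and i)
def pvIBody (piles : List Int) (j : Nat) (dp : List (List (Int × Int))) (i : Nat) :
    List (List (Int × Int)) :=
  let left := piles.getD i 0 + (pvGet dp (i+1) j).2
  let right := piles.getD j 0 + (pvGet dp i (j-1)).2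
  if left > right then pvSet dp i j (left, (pvGet dp (i+1) j).1)
  else pvSet dp i j (right, (pvGet dp i (j-1)).1)

def stoneGame_1 (piles : List Int) : Bool :=
  let size := piles.length
  -- dp = [[[0,0] for _ in range(size)] for _ in range(size)]
  let dp0 := (List.range size).map
    (fun _ => (List.range size).map (fun _ => ((0 : Int), (0 : Int))))
  -- for i in range(size): dp[i][i][0] = piles[i]
  let dp1 := (List.range size).foldl
    (fun dp i => pvSet dp i i (piles.getD i 0, (pvGet dp i i).2)) dp0
  -- for j in range(1, size): for i in range(j-1, -1, -1): …
  let dp2 := ((List.range size).drop 1).foldl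
    (fun dp j => ((List.range j).reverse).foldl (pvIBody piles j) dp) dp1
  -- bool(dp[0][size-1][0] - dp[0][size-1][1])
  decide ((pvGet dp2 0 (size-1)).1 - (pvGet dp2 0 (size-1)).2 ≠ 0)

-- ===== PORT B =====
-- f(i,j): best achievable (own - opponent) score difference on piles[i..j]
-- (the memo dict of Source B is a pure cache; the `i < j` test is only a totality guard,
-- inside Pre_ the recursion only reaches i ≤ j)
def pvAltF (piles : List Int) (i j : Nat) : Int :=
  if i = j then piles.getD i 0
  else if _h : i < j then
    max (piles.getD i 0 - pvAltF piles (i+1) j) (piles.getD j 0 - pvAltF piles i (j-1))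
  else 0
termination_by j - i
decreasing_by all_goals omega

def stoneGame_1_alt (piles : List Int) : Bool :=
  decide (pvAltF piles 0 (piles.length - 1) ≠ 0)

-- ===== PRECONDITION & SPEC =====
-- Pre_ excludes only the empty list, on which A raises IndexError (dp[0] of an empty table).
def Pre_stoneGame_1 (piles : List Int) : Prop := piles ≠ []
instance (piles : List Int) : Decidable (Pre_stoneGame_1 piles) := by
  unfold Pre_stoneGame_1; infer_instance

def pvWitness_stoneGame_1 : List Int := [5, 3, 4, 5]

def Spec_stoneGame_1 (piles : List Int) (out : Bool) : Prop := out = stoneGame_1_alt piles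
instance (piles : List Int) (out : Bool) : Decidable (Spec_stoneGame_1 piles out) := by
  unfold Spec_stoneGame_1; infer_instance

-- ===== CLAIM (what is proved, stated in full; the proofs are below) =====
def Claim_equal_stoneGame_1 : Prop := ∀ (piles : List Int), Dom_stoneGame_1 piles → Pre_stoneGame_1 piles → Spec_stoneGame_1 piles (stoneGame_1 piles)

-- ===== LEMMAS AND PROOFS =====

-- reference recursion mirroring A's cell contents: pvFS i j = (first, second) on [i,j]
def pvFS (piles : List Int) (i j : Nat) : Int × Int :=
  if i = j then (piles.getD i 0, 0)
  else if _h : i < j then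
    if piles.getD i 0 + (pvFS piles (i+1) j).2 > piles.getD j 0 + (pvFS piles i (j-1)).2
    then (piles.getD i 0 + (pvFS piles (i+1) j).2, (pvFS piles (i+1) j).1)
    else (piles.getD j 0 + (pvFS piles i (j-1)).2, (pvFS piles i (j-1)).1)
  else (0, 0)
termination_by j - i
decreasing_by all_goals omega

-- total stones in piles[i..j]
def pvT (piles : List Int) (i j : Nat) : Int :=
  if i = j then piles.getD i 0
  else if _h : i < j then piles.getD i 0 + pvT piles (i+1) j
  else 0
termination_by j - i
decreasing_by all_goals omega

lemma pvT_right (piles : List Int) : ∀ n i j, j - i = n → i < j →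
    pvT piles i j = piles.getD j 0 + pvT piles i (j-1) := by
  intro n
  induction n using Nat.strong_induction_on with
  | _ n ih =>
    intro i j hn hij
    rw [pvT, if_neg (by omega : ¬ i = j), dif_pos hij]
    by_cases h1 : i + 1 = j
    · rw [show pvT piles (i+1) j = piles.getD j 0 by rw [pvT, if_pos h1, h1],
          show pvT piles i (j-1) = piles.getD i 0 by
            rw [pvT, if_pos (by omega : i = j - 1)]]
      ring
    · have h2 : i + 1 < j := by omega
      rw [ih (j - (i+1)) (by omega) (i+1) j rfl h2,
          show pvT piles i (j-1) = piles.getD i 0 + pvT piles (i+1) (j-1) by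
            rw [pvT, if_neg (by omega : ¬ i = j - 1), dif_pos (by omega : i < j - 1)]]
      ring

lemma pvFS_sum (piles : List Int) : ∀ n i j, j - i = n → i ≤ j →
    (pvFS piles i j).1 + (pvFS piles i j).2 = pvT piles i j := by
  intro n
  induction n using Nat.strong_induction_on with
  | _ n ih =>
    intro i j hn hij
    by_cases h : i = j
    · subst h; rw [pvFS, pvT]; simp
    · have hij' : i < j := by omega
      rw [pvFS, if_neg h, dif_pos hij']
      have ih1 := ih (j - (i+1)) (by omega) (i+1) j rfl (by omega)
      have ih2 := ih ((j-1) - i) (by omega) i (j-1) rfl (by omega)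
      have hT : pvT piles i j = piles.getD i 0 + pvT piles (i+1) j := by
        rw [pvT, if_neg h, dif_pos hij']
      have hTr := pvT_right piles (j - i) i j rfl hij'
      split_ifs with hc <;> dsimp only <;> omega

lemma pvFS_diff (piles : List Int) : ∀ n i j, j - i = n → i ≤ j →
    (pvFS piles i j).1 - (pvFS piles i j).2 = pvAltF piles i j := by
  intro n
  induction n using Nat.strong_induction_on with
  | _ n ih =>
    intro i j hn hij
    by_cases h : i = j
    · subst h; rw [pvFS, pvAltF]; simp
    · have hij' : i < j := by omega
      rw [pvFS, pvAltF, if_neg h, dif_pos hij', if_neg h, dif_pos hij']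
      have ih1 := ih (j - (i+1)) (by omega) (i+1) j rfl (by omega)
      have ih2 := ih ((j-1) - i) (by omega) i (j-1) rfl (by omega)
      have s1 := pvFS_sum piles (j - (i+1)) (i+1) j rfl (by omega)
      have s2 := pvFS_sum piles ((j-1) - i) i (j-1) rfl (by omega)
      have hT : pvT piles i j = piles.getD i 0 + pvT piles (i+1) j := by
        rw [pvT, if_neg h, dif_pos hij']
      have hTr := pvT_right piles (j - i) i j rfl hij'
      rcases max_cases (piles.getD i 0 - pvAltF piles (i+1) j)
        (piles.getD j 0 - pvAltF piles i (j-1)) with ⟨hmax, hle⟩ | ⟨hmax, hlt⟩ <;>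
        rw [hmax] <;> split_ifs with hc <;> dsimp only <;> omega

-- a square table of side n
def pvWF (n : Nat) (dp : List (List (Int × Int))) : Prop :=
  dp.length = n ∧ ∀ r ∈ dp, r.length = n

lemma pvGetD_mem_or {α : Type} (l : List α) (i : Nat) (d : α) :
    l.getD i d = d ∨ l.getD i d ∈ l := by
  by_cases h : i < l.length
  · right; rw [List.getD_eq_getElem l d h]; exact List.getElem_mem h
  · left; rw [List.getD_eq_default]; omega

lemma pvSet_WF (n : Nat) (dp : List (List (Int × Int))) (i j : Nat) (v : Int × Int)
    (h : pvWF n dp) (hi : i < n) : pvWF n (pvSet dp i j v) := by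
  obtain ⟨hlen, hrows⟩ := h
  constructor
  · rw [pvSet, List.length_set, hlen]
  · intro r hr
    rcases List.mem_or_eq_of_mem_set hr with hmem | heq
    · exact hrows r hmem
    · subst heq
      rw [List.length_set]
      have : dp.getD i [] ∈ dp := by
        rcases pvGetD_mem_or dp i [] with h0 | h0
        · exfalso
          have := congrArg List.length h0
          rw [hrows (dp.getD i []) ?_] at this
          · simp at this; omega
          · rw [List.getD_eq_getElem dp [] (by omega)]; exact List.getElem_mem (by omega)
        · exact h0
      exact hrows _ this

lemma pvGet_pvSet (n : Nat) (dp : List (List (Int × Int))) (i j : Nat) (v : Int × Int)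
    (h : pvWF n dp) (hi : i < n) (hj : j < n) (a b : Nat) :
    pvGet (pvSet dp i j v) a b = if a = i ∧ b = j then v else pvGet dp a b := by
  obtain ⟨hlen, hrows⟩ := h
  have hrowlen : (dp.getD i []).length = n := by
    rw [List.getD_eq_getElem dp [] (by omega)]
    exact hrows _ (List.getElem_mem (by omega))
  unfold pvGet pvSet
  by_cases ha : a = i
  · subst ha
    have h1 : (dp.set a ((dp.getD a []).set j v)).getD a [] = (dp.getD a []).set j v := by
      rw [List.getD_eq_getElem _ [] (by rw [List.length_set]; omega)]
      exact List.getElem_set_self _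
    rw [h1]
    by_cases hb : b = j
    · subst hb
      rw [if_pos ⟨rfl, rfl⟩, List.getD_eq_getElem _ _ (by rw [List.length_set]; omega)]
      exact List.getElem_set_self _
    · rw [if_neg (by tauto)]
      have h3 : ((dp.getD a []).set j v).getD b (0, 0) = (dp.getD a []).getD b (0, 0) := by
        by_cases hblt : b < (dp.getD a []).length
        · rw [List.getD_eq_getElem _ _ (by rw [List.length_set]; omega),
              List.getD_eq_getElem _ _ hblt]
          exact List.getElem_set_ne (by omega) _
        · rw [List.getD_eq_default _ _ (by rw [List.length_set]; omega),
              List.getD_eq_default _ _ (by omega)]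
      rw [h3]
  · rw [if_neg (by tauto)]
    have h2 : (dp.set i ((dp.getD i []).set j v)).getD a [] = dp.getD a [] := by
      by_cases halt : a < dp.length
      · rw [List.getD_eq_getElem _ [] (by rw [List.length_set]; omega),
            List.getD_eq_getElem _ [] halt]
        exact List.getElem_set_ne (by omega) _
      · rw [List.getD_eq_default _ _ (by rw [List.length_set]; omega),
            List.getD_eq_default _ _ (by omega)]
    rw [h2]

-- the fresh all-zero table
lemma pvGet_zero (size a b : Nat) :
    pvGet ((List.range size).map
      (fun _ => (List.range size).map (fun _ => ((0 : Int), (0 : Int))))) a b = (0, 0) := by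
  unfold pvGet
  rcases pvGetD_mem_or ((List.range size).map
      (fun _ => (List.range size).map (fun _ => ((0 : Int), (0 : Int))))) a [] with h0 | h0
  · rw [h0]; rfl
  · rcases List.mem_map.mp h0 with ⟨x, _, hx⟩
    rw [← hx]
    rcases pvGetD_mem_or ((List.range size).map (fun _ => ((0 : Int), (0 : Int)))) b (0, 0)
      with h1 | h1
    · exact h1
    · rcases List.mem_map.mp h1 with ⟨y, _, hy⟩
      exact hy.symm

lemma pvWF_zero (size : Nat) :
    pvWF size ((List.range size).map
      (fun _ => (List.range size).map (fun _ => ((0 : Int), (0 : Int))))) := by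
  constructor
  · simp
  · intro r hr
    rcases List.mem_map.mp hr with ⟨x, _, hx⟩
    rw [← hx]; simp

-- closed form of the base-case fold
lemma pvBase (piles : List Int) (n : Nat) (hn : n ≤ piles.length) :
    pvWF piles.length
      ((List.range n).foldl (fun dp i => pvSet dp i i (piles.getD i 0, (pvGet dp i i).2))
        ((List.range piles.length).map
          (fun _ => (List.range piles.length).map (fun _ => ((0 : Int), (0 : Int)))))) ∧
    ∀ a b, pvGet
      ((List.range n).foldl (fun dp i => pvSet dp i i (piles.getD i 0, (pvGet dp i i).2))
        ((List.range piles.length).map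
          (fun _ => (List.range piles.length).map (fun _ => ((0 : Int), (0 : Int)))))) a b =
      if a = b ∧ a < n then (piles.getD a 0, 0) else (0, 0) := by
  induction n with
  | zero =>
    refine ⟨pvWF_zero piles.length, fun a b => ?_⟩
    simp only [List.range_zero, List.foldl_nil]
    rw [pvGet_zero, if_neg (by omega)]
  | succ n ihn =>
    obtain ⟨hwf, hget⟩ := ihn (by omega)
    rw [List.range_succ, List.foldl_append]
    simp only [List.foldl_cons, List.foldl_nil]
    refine ⟨pvSet_WF _ _ _ _ _ hwf (by omega), fun a b => ?_⟩
    rw [pvGet_pvSet piles.length _ n n _ hwf (by omega) (by omega)]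
    have hnn : (pvGet ((List.range n).foldl
        (fun dp i => pvSet dp i i (piles.getD i 0, (pvGet dp i i).2))
        ((List.range piles.length).map
          (fun _ => (List.range piles.length).map (fun _ => ((0 : Int), (0 : Int)))))) n n).2 = 0 := by
      rw [hget n n]; split_ifs <;> rfl
    rw [hnn, hget a b]
    by_cases h1 : a = n ∧ b = n
    · obtain ⟨h1a, h1b⟩ := h1; subst h1a; subst h1b
      rw [if_pos ⟨rfl, rfl⟩, if_pos ⟨rfl, by omega⟩]
    · rw [if_neg h1]
      split_ifs <;> first | rfl | omega

-- invariant of the DP table after filling columns 1..m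
def pvInv (piles : List Int) (m : Nat) (dp : List (List (Int × Int))) : Prop :=
  pvWF piles.length dp ∧ ∀ a b, b < piles.length →
    pvGet dp a b = if a = b ∨ (a < b ∧ b ≤ m) then pvFS piles a b else (0, 0)

-- invariant while the inner loop of column j has processed i = j-1 … k
def pvIInv (piles : List Int) (j k : Nat) (dp : List (List (Int × Int))) : Prop :=
  pvWF piles.length dp ∧ ∀ a b, b < piles.length →
    pvGet dp a b = if a = b ∨ (a < b ∧ b + 1 ≤ j) ∨ (k ≤ a ∧ a < j ∧ b = j) then
      pvFS piles a b else (0, 0)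

lemma pvInner_step (piles : List Int) (j k : Nat) (dp : List (List (Int × Int)))
    (hk : k < j) (hj : j < piles.length) (h : pvIInv piles j (k+1) dp) :
    pvIInv piles j k (pvIBody piles j dp k) := by
  obtain ⟨hwf, h⟩ := h
  have hdp1 : pvGet dp (k+1) j = pvFS piles (k+1) j := by
    rw [h (k+1) j hj, if_pos (by omega)]
  have hdp2 : pvGet dp k (j-1) = pvFS piles k (j-1) := by
    rw [h k (j-1) (by omega), if_pos (by omega)]
  have hFS : pvFS piles k j =
      if piles.getD k 0 + (pvFS piles (k+1) j).2 > piles.getD j 0 + (pvFS piles k (j-1)).2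
      then (piles.getD k 0 + (pvFS piles (k+1) j).2, (pvFS piles (k+1) j).1)
      else (piles.getD j 0 + (pvFS piles k (j-1)).2, (pvFS piles k (j-1)).1) := by
    rw [pvFS, if_neg (by omega : ¬ k = j), dif_pos hk]
  constructor
  · simp only [pvIBody]
    split_ifs <;> exact pvSet_WF _ _ _ _ _ hwf (by omega)
  intro a b hb
  simp only [pvIBody]
  rw [hdp1, hdp2]
  have hgs : ∀ v, pvGet (pvSet dp k j v) a b = if a = k ∧ b = j then v else pvGet dp a b :=
    fun v => pvGet_pvSet piles.length dp k j v hwf (by omega) (by omega) a b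
  by_cases hab : a = k ∧ b = j
  · obtain ⟨ha, hbj⟩ := hab; subst ha; subst hbj
    rw [if_pos (show (a = b ∨ (a < b ∧ b + 1 ≤ b) ∨ (a ≤ a ∧ a < b ∧ b = b)) by omega), hFS]
    split_ifs with hc
    · rw [hgs, if_pos ⟨rfl, rfl⟩]
    · rw [hgs, if_pos ⟨rfl, rfl⟩]
  · have hgoal : pvGet dp a b =
        if (a = b ∨ (a < b ∧ b + 1 ≤ j) ∨ (k ≤ a ∧ a < j ∧ b = j)) then pvFS piles a b
        else (0, 0) := by
      rw [h a b hb]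
      by_cases hc2 : (a = b ∨ (a < b ∧ b + 1 ≤ j) ∨ (k + 1 ≤ a ∧ a < j ∧ b = j))
      · rw [if_pos hc2, if_pos (by omega)]
      · rw [if_neg hc2, if_neg (by omega)]
    split_ifs <;> rw [hgs, if_neg hab, hgoal] <;> split_ifs <;> rfl

lemma pvInner (piles : List Int) (j : Nat) (hj : j < piles.length) :
    ∀ k, k ≤ j → ∀ dp, pvIInv piles j k dp →
      pvIInv piles j 0 (((List.range k).reverse).foldl (pvIBody piles j) dp) := by
  intro k
  induction k with
  | zero =>
    intro _ dp h
    simp only [List.range_zero, List.reverse_nil, List.foldl_nil]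
    exact h
  | succ k ihk =>
    intro hkj dp h
    rw [List.range_succ, List.reverse_append, List.reverse_singleton]
    simp only [List.singleton_append, List.foldl_cons]
    exact ihk (by omega) _ (pvInner_step piles j k dp (by omega) hj h)

lemma pvInvBase (piles : List Int) :
    pvInv piles 0
      ((List.range piles.length).foldl
        (fun dp i => pvSet dp i i (piles.getD i 0, (pvGet dp i i).2))
        ((List.range piles.length).map
          (fun _ => (List.range piles.length).map (fun _ => ((0 : Int), (0 : Int)))))) := by
  obtain ⟨hwf, hget⟩ := pvBase piles piles.length (le_refl _)
  refine ⟨hwf, fun a b hb => ?_⟩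
  rw [hget a b]
  by_cases hab : a = b
  · subst hab
    rw [if_pos ⟨rfl, hb⟩, if_pos (Or.inl rfl), pvFS, if_pos rfl]
  · rw [if_neg (fun hx => hab hx.1), if_neg (by omega)]

lemma pvOuter (piles : List Int) :
    ∀ m, m ≤ piles.length →
      pvInv piles (m - 1)
        (((List.range m).drop 1).foldl
          (fun dp j => ((List.range j).reverse).foldl (pvIBody piles j) dp)
          ((List.range piles.length).foldl
            (fun dp i => pvSet dp i i (piles.getD i 0, (pvGet dp i i).2))
            ((List.range piles.length).map
              (fun _ => (List.range piles.length).map (fun _ => ((0 : Int), (0 : Int))))))) := by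
  intro m
  induction m with
  | zero =>
    intro _
    simpa only [List.range_zero, List.drop_nil, List.foldl_nil] using pvInvBase piles
  | succ m ihm =>
    intro hm
    by_cases hm0 : m = 0
    · subst hm0
      simpa only [List.range_succ, List.range_zero, List.nil_append, List.drop_succ_cons,
        List.drop_nil, List.foldl_nil] using pvInvBase piles
    · have hdrop : (List.range (m+1)).drop 1 = (List.range m).drop 1 ++ [m] := by
        rw [List.range_succ, List.drop_append_of_le_length (by simp; omega)]
      rw [hdrop, List.foldl_append]
      simp only [List.foldl_cons, List.foldl_nil]
      obtain ⟨hwfp, hgetp⟩ := ihm (by omega)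
      have hstart : pvIInv piles m m
          (((List.range m).drop 1).foldl
            (fun dp j => ((List.range j).reverse).foldl (pvIBody piles j) dp)
            ((List.range piles.length).foldl
              (fun dp i => pvSet dp i i (piles.getD i 0, (pvGet dp i i).2))
              ((List.range piles.length).map
                (fun _ => (List.range piles.length).map (fun _ => ((0 : Int), (0 : Int))))))) := by
        refine ⟨hwfp, fun a b hb => ?_⟩
        rw [hgetp a b hb]
        by_cases hc : (a = b ∨ (a < b ∧ b ≤ m - 1))
        · rw [if_pos hc, if_pos (by omega)]
        · rw [if_neg hc, if_neg (by omega)]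
      obtain ⟨hwfr, hgetr⟩ := pvInner piles m (by omega) m (le_refl m) _ hstart
      refine ⟨hwfr, fun a b hb => ?_⟩
      rw [hgetr a b hb]
      by_cases hc : (a = b ∨ (a < b ∧ b + 1 ≤ m) ∨ (0 ≤ a ∧ a < m ∧ b = m))
      · rw [if_pos hc, if_pos (by omega)]
      · rw [if_neg hc, if_neg (by omega)]

-- ===== VERDICT (by name: the statement is the Claim_ definition above) =====
theorem stoneGame_1_spec : Claim_equal_stoneGame_1 := by
  intro piles _ hpre
  unfold Spec_stoneGame_1
  simp only [stoneGame_1, stoneGame_1_alt]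
  have hlen : 1 ≤ piles.length := by
    cases piles with
    | nil => exact absurd rfl hpre
    | cons x xs => simp
  have hcell := (pvOuter piles piles.length (le_refl _)).2 0 (piles.length - 1) (by omega)
  rw [if_pos (by omega)] at hcell
  rw [hcell, pvFS_diff piles (piles.length - 1 - 0) 0 (piles.length - 1) rfl (by omega)]
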